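-- pv_equiv track=rewrite | github.com/primegonzola/prunella | samples/haproxy/scripts/frontend/utils/hexatrig.py | hostname_to_instance_id
-- ===== SOURCE A (Python) =====
-- def hostname_to_instance_id(hostname):
--     '''hostname_to_instance_id'''
--     # get last 6 characters and remove leading zeroes
--     hexatrig = hostname[-6:].lstrip('0')
--     multiplier = 1
--     vmid = 0
--     # reverse string and process each char
--     for xee in hexatrig[::-1]:
--         if xee.isdigit():
--             vmid += int(xee) * multiplier
--         else:
--             # convert letter to corresponding integer
--             vmid += (ord(xee) - 55) * multiplier
--         multiplier *= 36
--     return vmid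
-- ===== SOURCE B (Python) =====
-- def hostname_to_instance_id(hostname):
--     '''hostname_to_instance_id'''
--     # Horner's method over the lstripped 6-char suffix, left to right.
--     vmid = 0
--     for c in hostname[-6:].lstrip('0'):
--         vmid = vmid * 36 + (int(c) if c.isdigit() else ord(c) - 55)
--     return vmid
-- ===== Notes on version B (the rewrite author's own statement) =====
-- stated objective: idiomatic
-- what changed: Replaces the reversed traversal with an explicit power-of-36 multiplier accumulator by a left-to-right Horner fold (vmid = vmid*36 + digit), dropping the multiplier variable.
import Mathlib
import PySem

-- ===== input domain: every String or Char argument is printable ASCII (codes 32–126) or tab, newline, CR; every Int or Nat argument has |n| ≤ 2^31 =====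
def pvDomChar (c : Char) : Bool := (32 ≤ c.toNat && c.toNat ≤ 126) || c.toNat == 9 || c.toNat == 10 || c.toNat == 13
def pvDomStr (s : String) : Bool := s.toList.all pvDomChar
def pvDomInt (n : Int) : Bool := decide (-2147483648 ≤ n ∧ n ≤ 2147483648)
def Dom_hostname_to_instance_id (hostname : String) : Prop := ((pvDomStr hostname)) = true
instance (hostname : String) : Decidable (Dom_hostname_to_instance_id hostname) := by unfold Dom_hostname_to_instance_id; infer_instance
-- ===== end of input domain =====

-- B replaces the reversed loop with an explicit multiplier by a left-to-right Horner fold (idiomatic; same cost).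

-- ===== PORT A =====
-- int(xee) on a single character string (in both programs it is only reached when xee.isdigit(),
-- where ofChars? is some; the getD 0 default is unreachable)
def pvIntChar (c : Char) : Int := (PySem.Int.ofChars? [c]).getD 0

-- hostname[-6:].lstrip('0'): the slice is PySem.List.slice, and lstrip('0') is ported by hand as
-- dropWhile (· == '0') — exact, since lstrip with a one-character set drops exactly the leading '0's
def pvHexatrig (hostname : String) : List Char :=
  (PySem.List.slice hostname.toList (some (-6)) none).dropWhile (· == '0')

def hostname_to_instance_id (hostname : String) : Int :=
  let hexatrig := pvHexatrig hostname
  -- for xee in hexatrig[::-1], state (multiplier, vmid) starting at (1, 0)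
  (hexatrig.reverse.foldl
    (fun (st : Int × Int) xee =>
      (st.1 * 36,
       if PySem.Chars.isdigit xee then st.2 + pvIntChar xee * st.1
       else st.2 + ((xee.toNat : Int) - 55) * st.1))
    (1, 0)).2

-- ===== PORT B =====
def hostname_to_instance_id_alt (hostname : String) : Int :=
  (pvHexatrig hostname).foldl
    (fun vmid c =>
      vmid * 36 + (if PySem.Chars.isdigit c then pvIntChar c else (c.toNat : Int) - 55))
    0

-- ===== PRECONDITION & SPEC =====
def Spec_hostname_to_instance_id (hostname : String) (out : Int) : Prop := out = hostname_to_instance_id_alt hostname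
instance (hostname : String) (out : Int) : Decidable (Spec_hostname_to_instance_id hostname out) := by unfold Spec_hostname_to_instance_id; infer_instance

-- ===== CLAIM (what is proved, stated in full; the proofs are below) =====
def Claim_equal_hostname_to_instance_id : Prop := ∀ (hostname : String), Dom_hostname_to_instance_id hostname → Spec_hostname_to_instance_id hostname (hostname_to_instance_id hostname)

-- ===== LEMMAS AND PROOFS =====

-- the shared per-character digit value
def pvDv (c : Char) : Int :=
  if PySem.Chars.isdigit c then pvIntChar c else (c.toNat : Int) - 55

-- the value of a little-endian (least significant first) digit list
def pvR : List Char → Int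
  | [] => 0
  | c :: cs => pvDv c + 36 * pvR cs

lemma pvFoldlA (l : List Char) : ∀ (m v : Int),
    (l.foldl
      (fun (st : Int × Int) xee =>
        (st.1 * 36,
         if PySem.Chars.isdigit xee then st.2 + pvIntChar xee * st.1
         else st.2 + ((xee.toNat : Int) - 55) * st.1))
      (m, v)).2 = v + m * pvR l := by
  induction l with
  | nil => simp [pvR]
  | cons c cs ih =>
    intro m v
    simp only [List.foldl_cons, pvR]
    rw [ih]
    unfold pvDv
    split_ifs <;> ring

lemma pvR_append (xs : List Char) (c : Char) :
    pvR (xs ++ [c]) = pvR xs + 36 ^ xs.length * pvDv c := by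
  induction xs with
  | nil => simp [pvR]
  | cons x xs ih => simp [pvR, ih]; ring

lemma pvFoldlB (l : List Char) : ∀ (v : Int),
    l.foldl
      (fun vmid c =>
        vmid * 36 + (if PySem.Chars.isdigit c then pvIntChar c else (c.toNat : Int) - 55))
      v = v * 36 ^ l.length + pvR l.reverse := by
  induction l with
  | nil => simp [pvR]
  | cons c cs ih =>
    intro v
    simp only [List.foldl_cons, List.reverse_cons]
    rw [ih, pvR_append]
    simp only [List.length_reverse, List.length_cons]
    show _ = v * 36 ^ (cs.length + 1) + (pvR cs.reverse + 36 ^ cs.length * pvDv c)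
    unfold pvDv
    split_ifs <;> ring

-- ===== VERDICT (by name: the statement is the Claim_ definition above) =====
theorem hostname_to_instance_id_spec : Claim_equal_hostname_to_instance_id := by
  intro hostname _
  unfold Spec_hostname_to_instance_id hostname_to_instance_id hostname_to_instance_id_alt
  rw [pvFoldlA, pvFoldlB]
  simp
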